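-- pv_equiv track=rewrite | github.com/Scott1015/gohan | scripts/render-demo-gif.py | milestone_indices
-- ===== SOURCE A (Python) =====
-- def milestone_indices(lines: list[str]) -> list[int]:
--     indices: list[int] = []
--     for index, line in enumerate(lines):
--         if line.startswith("==>") or line.startswith("Joint demo completed successfully."):
--             indices.append(index)
--
--     if lines:
--         indices.append(len(lines) - 1)
--
--     deduped: list[int] = []
--     for index in indices:
--         if deduped and deduped[-1] == index:
--             continue
--         deduped.append(index)
--     return deduped
-- ===== SOURCE B (Python) =====
-- def milestone_indices(lines: list[str]) -> list[int]:
--     # One backward pass: seed with the final line's index, then walk the lines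
--     # right-to-left prepending (by appending to the reversed output) every
--     # matching index that is not already the most recently added one; reverse
--     # at the end.  No dedup pass and no trailing append are needed.
--     rev: list[int] = [len(lines) - 1] if lines else []
--     for index, line in reversed(list(enumerate(lines))):
--         if (line.startswith("==>") or line.startswith("Joint demo completed successfully.")) \
--                 and not (rev and rev[-1] == index):
--             rev.append(index)
--     return rev[::-1]
-- ===== Notes on version B (the rewrite author's own statement) =====
-- stated objective: alternative
-- what changed: B builds the result back-to-front in a single reversed pass seeded with the final line's index (skipping a match that equals the most recently added index), then reverses, eliminating A's unconditional trailing append and its separate consecutive-dedup pass.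
import Mathlib
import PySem

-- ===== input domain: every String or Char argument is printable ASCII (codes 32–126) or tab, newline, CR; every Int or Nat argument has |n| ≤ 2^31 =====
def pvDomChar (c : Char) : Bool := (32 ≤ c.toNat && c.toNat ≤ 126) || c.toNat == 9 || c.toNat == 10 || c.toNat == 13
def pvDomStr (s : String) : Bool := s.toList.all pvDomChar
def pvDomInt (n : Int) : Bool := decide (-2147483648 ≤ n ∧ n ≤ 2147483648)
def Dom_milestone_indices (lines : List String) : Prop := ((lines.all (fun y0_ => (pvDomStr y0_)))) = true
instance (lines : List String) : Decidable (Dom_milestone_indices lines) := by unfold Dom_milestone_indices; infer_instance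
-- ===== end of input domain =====

-- B builds the result back-to-front in one reversed pass seeded with the final index,
-- eliminating A's unconditional trailing append and consecutive-dedup pass: alternative.

-- the milestone test both Pythons apply to a line
def msTest (line : String) : Bool :=
  PySem.Str.startswith line "==>" || PySem.Str.startswith line "Joint demo completed successfully."

-- ===== PORT A =====
-- step of A's dedup loop: 'if deduped and deduped[-1] == index: continue; deduped.append(index)'
def pvDedupStep (ded : List Int) (i : Int) : List Int :=
  if ded ≠ [] ∧ ded.getLast? = some i then ded else ded ++ [i]

def milestone_indices (lines : List String) : List Int :=
  let indices : List Int :=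
    (PySem.List.enumerate lines).foldl
      (fun acc p => if msTest p.2 then acc ++ [p.1] else acc) []
  let indices := if lines ≠ [] then indices ++ [(lines.length : Int) - 1] else indices
  indices.foldl pvDedupStep []

-- ===== PORT B =====
-- step of B's backward loop: 'if match(line) and not (rev and rev[-1] == index): rev.append(index)'
def pvRevStep (rev : List Int) (p : Int × String) : List Int :=
  if msTest p.2 ∧ ¬(rev ≠ [] ∧ rev.getLast? = some p.1) then rev ++ [p.1] else rev

def milestone_indices_alt (lines : List String) : List Int :=
  let rev : List Int := if lines ≠ [] then [(lines.length : Int) - 1] else []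
  let rev := ((PySem.List.enumerate lines).reverse).foldl pvRevStep rev
  rev.reverse   -- rev[::-1] is exactly List.reverse (PySem.List.slice?_none_none_neg_one)

-- ===== PRECONDITION & SPEC =====
def Spec_milestone_indices (lines : List String) (out : List Int) : Prop := out = milestone_indices_alt lines
instance (lines : List String) (out : List Int) : Decidable (Spec_milestone_indices lines out) := by unfold Spec_milestone_indices; infer_instance

-- ===== CLAIM (what is proved, stated in full; the proofs are below) =====
def Claim_equal_milestone_indices : Prop := ∀ (lines : List String), Dom_milestone_indices lines → Spec_milestone_indices lines (milestone_indices lines)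

-- ===== LEMMAS AND PROOFS =====

-- A's dedup loop leaves a list with pairwise-distinct adjacent elements unchanged.
theorem foldl_dedup_of_chain (L : List Int) : ∀ (acc : List Int),
    (acc ++ L).IsChain (· ≠ ·) → L.foldl pvDedupStep acc = acc ++ L := by
  induction L with
  | nil => intro acc _; simp
  | cons x xs ih =>
    intro acc h
    have hstep : pvDedupStep acc x = acc ++ [x] := by
      unfold pvDedupStep
      rcases List.isChain_append.mp h with ⟨_, _, hlink⟩
      split_ifs with hc
      · exact absurd rfl (hlink x (by simp [hc.2]) x (by simp))
      · rfl
    have h' : ((acc ++ [x]) ++ xs).IsChain (· ≠ ·) := by simpa using h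
    simpa [List.foldl_cons, hstep] using ih (acc ++ [x]) h'

-- matching-index list of an enumeration, with b removed (proof-side abbreviation)
def pvFlt (E : List (Int × String)) (b : Int) : List Int :=
  ((E.filter (fun q => msTest q.2)).map Prod.fst).filter (fun i => i ≠ b)

theorem pvFlt_cons (p : Int × String) (E : List (Int × String)) (b : Int) :
    pvFlt (p :: E) b = if msTest p.2 ∧ p.1 ≠ b then p.1 :: pvFlt E b else pvFlt E b := by
  by_cases hm : msTest p.2 <;> by_cases hpb : p.1 = b <;>
    simp [pvFlt, hm, hpb]

theorem getLast?_cons_reverse (l : List Int) (b : Int) :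
    (b :: l.reverse).getLast? = some (l.headD b) := by
  cases l with
  | nil => rfl
  | cons x t =>
    rw [List.reverse_cons, ← List.cons_append]
    exact List.getLast?_concat

-- B's backward loop, run on an index-increasing enumeration bounded by b,
-- produces b followed by the matching indices (other than b) in reverse.
theorem loopB (E : List (Int × String)) (b : Int)
    (hlt : E.Pairwise (fun p q => p.1 < q.1))
    (hle : ∀ p ∈ E, p.1 ≤ b) :
    E.reverse.foldl pvRevStep [b] = b :: (pvFlt E b).reverse := by
  induction E with
  | nil => simp [pvFlt]
  | cons p E' ih =>
    have hIH := ih hlt.of_cons (fun q hq => hle q (List.mem_cons_of_mem _ hq))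
    rw [List.reverse_cons, List.foldl_append, hIH, List.foldl_cons, List.foldl_nil, pvFlt_cons]
    by_cases hm : msTest p.2
    · by_cases hFe : pvFlt E' b = []
      · rw [hFe]
        by_cases hpb : p.1 = b
        · simp [pvRevStep, hm, hpb]
        · simp only [pvRevStep, hm, true_and, List.reverse_nil]
          rw [if_pos ?_]
          · simp [hpb]
          · intro hc
            have hb : b = p.1 := by simpa using hc.2
            exact hpb hb.symm
      · -- the reversed output ends in some x, and p.1 < x ≤ b, so p.1 is appended
        obtain ⟨x, F'', hF⟩ := List.exists_cons_of_ne_nil hFe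
        have hxF : x ∈ pvFlt E' b := by rw [hF]; exact List.mem_cons_self
        obtain ⟨q, hqE', hqx⟩ : ∃ q ∈ E', q.1 = x := by
          have h1 := List.mem_filter.mp hxF
          rcases List.mem_map.mp h1.1 with ⟨q, hq, hqx⟩
          exact ⟨q, (List.mem_filter.mp hq).1, hqx⟩
        have hpx : p.1 < x := hqx ▸ (List.pairwise_cons.mp hlt).1 q hqE'
        have hxb : x ≤ b := hqx ▸ hle q (List.mem_cons_of_mem _ hqE')
        have hpb : p.1 ≠ b := ne_of_lt (lt_of_lt_of_le hpx hxb)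
        have hlast : (b :: (pvFlt E' b).reverse).getLast? = some x := by
          rw [getLast?_cons_reverse, hF]; rfl
        have hstep : pvRevStep (b :: (pvFlt E' b).reverse) p
            = b :: ((p.1 :: pvFlt E' b).reverse) := by
          simp only [pvRevStep, hm, true_and, List.reverse_cons]
          rw [if_pos, List.cons_append]
          intro hc
          have hx := hc.2
          rw [hlast] at hx
          exact (ne_of_lt hpx).symm (Option.some.inj hx)
        rw [hstep, if_pos ⟨hm, hpb⟩]
    · simp [pvRevStep, hm]

-- a strictly increasing list bounded by b, with b removed and re-appended,
-- equals the 'append b unless it is already last' form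
theorem filter_ne_append (M : List Int) (b : Int)
    (hp : M.Pairwise (· < ·)) (hle : ∀ x ∈ M, x ≤ b) :
    M.filter (fun i => i ≠ b) ++ [b] = if M.getLast? = some b then M else M ++ [b] := by
  induction M with
  | nil => simp
  | cons x M' ih =>
    cases M' with
    | nil => by_cases hxb : x = b <;> simp [hxb]
    | cons y M'' =>
      have hp' := hp.of_cons
      have hle' : ∀ z ∈ y :: M'', z ≤ b := fun z hz => hle z (List.mem_cons_of_mem _ hz)
      have hxy : x < y := (List.pairwise_cons.mp hp).1 y List.mem_cons_self
      have hxb : x ≠ b := ne_of_lt (lt_of_lt_of_le hxy (hle' y List.mem_cons_self))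
      have hIH := ih hp' hle'
      rw [List.getLast?_cons_cons, List.filter_cons, if_pos (by simpa using hxb),
        List.cons_append, hIH]
      by_cases hend : (y :: M'').getLast? = some b <;> simp [hend]

theorem milestone_indices_spec : Claim_equal_milestone_indices := by
  intro lines _
  unfold Spec_milestone_indices milestone_indices milestone_indices_alt
  by_cases hnil : lines = []
  · subst hnil; simp [PySem.List.enumerate]
  · set E := PySem.List.enumerate lines with hE
    set b : Int := (lines.length : Int) - 1 with hb
    set M : List Int := (E.filter (fun p => msTest p.2)).map Prod.fst with hM
    have hElt : E.Pairwise (fun p q => p.1 < q.1) := PySem.List.pairwise_lt_enumerate lines 0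
    have hEle : ∀ p ∈ E, p.1 ≤ b := by
      intro p hp
      rcases (PySem.List.mem_enumerate_iff lines 0 p).mp hp with ⟨k, hk, hpk⟩
      have : p.1 = (k : Int) := by rw [hpk]; simp
      rw [this, hb]; omega
    have hMlt : M.Pairwise (· < ·) := by
      rw [hM, List.pairwise_map]; exact hElt.filter _
    have hMle : ∀ x ∈ M, x ≤ b := by
      intro x hx
      rcases List.mem_map.mp (hM ▸ hx) with ⟨p, hp, hpx⟩
      exact hpx ▸ hEle p (List.mem_filter.mp hp).1
    -- A's side: collected indices then dedup
    have hfoldA :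
        E.foldl (fun acc p => if msTest p.2 then acc ++ [p.1] else acc) ([] : List Int) = M := by
      simpa using PySem.List.foldl_append_if (fun p => msTest p.2) (fun p : Int × String => p.1) E []
    have hchain : (M ++ [b]).foldl pvDedupStep [] = if M.getLast? = some b then M else M ++ [b] := by
      have hMchain : M.IsChain (· ≠ ·) := (hMlt.imp fun h => ne_of_lt h).isChain
      have hMfold : M.foldl pvDedupStep [] = M := foldl_dedup_of_chain M [] (by simpa using hMchain)
      rw [List.foldl_append, hMfold, List.foldl_cons, List.foldl_nil]
      unfold pvDedupStep
      by_cases hend : M.getLast? = some b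
      · have hMne : M ≠ [] := by intro h; rw [h] at hend; simp at hend
        rw [if_pos ⟨hMne, hend⟩, if_pos hend]
      · rw [if_neg (fun h => hend h.2), if_neg hend]
    -- B's side: the backward pass
    have hB : E.reverse.foldl pvRevStep [b] = b :: (M.filter (fun i => i ≠ b)).reverse := by
      rw [loopB E b hElt hEle]; rfl
    simp only [hnil, ne_eq, not_false_eq_true, if_pos, hfoldA, hchain, hB]
    rw [List.reverse_cons, List.reverse_reverse]
    exact (filter_ne_append M b hMlt hMle).symm
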